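-- pv_equiv track=rewrite | github.com/pypi-data/pypi-mirror-378 | packages/phenodig/phenodig-0.3.9.tar.gz/phenodig-0.3.9/src/phenodig/growthmodels.py | get_unused_params
-- ===== SOURCE A (Python) =====
-- def get_unused_params(model_id):
--     cntNone = 0   # count params not contemplated in the respective models:
--     y0, tlag, mu, ymax, tmax, tdeath, mudeath = [None for i in range(7)]
--
--     if model_id == 'three_phase_linear':
--         for i in [tdeath, mudeath]: cntNone +=1
--     if model_id == 'four_phase_linear':
--         for i in []: cntNone +=1
--     if model_id == 'gompertz':
--         for i in [tmax, tdeath, mudeath]: cntNone +=1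
--     if model_id == 'logistic':
--         for i in [tmax, tdeath, mudeath]: cntNone +=1
--     if model_id == 'richards':
--         for i in [tmax, tdeath, mudeath]: cntNone +=1
--     if model_id == 'baranyi':
--         for i in [tmax, tdeath, mudeath]: cntNone +=1
--     if model_id == 'baranyi_nolag':
--         for i in [tlag, tmax, tdeath, mudeath]: cntNone +=1
--     if model_id == 'baranyi_nostat':
--         for i in [ymax, tmax, tdeath, mudeath]: cntNone +=1
--     if model_id == 'baranyi_wlind':
--         for i in [tmax]: cntNone +=1
--     if model_id == 'baranyi_wexpd':
--         for i in [tmax]: cntNone +=1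
--     if model_id == 'garcia':
--         for i in [tmax, tdeath, mudeath]: cntNone +=1
--
--     return cntNone
-- ===== SOURCE B (Python) =====
-- _UNUSED_COUNTS = {
--     'three_phase_linear': 2,
--     'four_phase_linear': 0,
--     'gompertz': 3,
--     'logistic': 3,
--     'richards': 3,
--     'baranyi': 3,
--     'baranyi_nolag': 4,
--     'baranyi_nostat': 4,
--     'baranyi_wlind': 1,
--     'baranyi_wexpd': 1,
--     'garcia': 3,
-- }
--
-- def get_unused_params(model_id):
--     return _UNUSED_COUNTS.get(model_id, 0)
-- ===== Notes on version B (the rewrite author's own statement) =====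
-- stated objective: simpler
-- what changed: Replaced the 11-way if-cascade that counts a loop over dummy None placeholders with a single constant dict mapping model_id to its unused-param count, read with .get(model_id, 0).
import Mathlib
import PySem

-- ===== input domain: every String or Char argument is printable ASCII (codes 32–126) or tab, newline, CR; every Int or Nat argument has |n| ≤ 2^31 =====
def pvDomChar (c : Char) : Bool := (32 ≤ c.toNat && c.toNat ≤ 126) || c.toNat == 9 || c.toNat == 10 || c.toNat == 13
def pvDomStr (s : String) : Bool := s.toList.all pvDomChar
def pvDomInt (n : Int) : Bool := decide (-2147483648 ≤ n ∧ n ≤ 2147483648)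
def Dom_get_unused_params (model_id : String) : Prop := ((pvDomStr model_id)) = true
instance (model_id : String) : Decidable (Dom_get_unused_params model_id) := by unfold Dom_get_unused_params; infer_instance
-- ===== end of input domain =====

-- B replaces A's 11-way if-cascade (counting dummy None placeholders in a loop) by one
-- constant table lookup with default 0; objective: simpler.

-- ===== PORT A =====
-- A counts by looping '+1' over lists of None placeholders; we transliterate each loop
-- as a foldl over the corresponding list of 'none' values.
def get_unused_params (model_id : String) : Int :=
  let cntNone : Int := 0
  let tlag : Option Int := none
  let mu : Option Int := none
  let ymax : Option Int := none
  let tmax : Option Int := none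
  let tdeath : Option Int := none
  let mudeath : Option Int := none
  let _ := mu
  let cntNone := if model_id = "three_phase_linear" then
      [tdeath, mudeath].foldl (fun c _ => c + 1) cntNone else cntNone
  let cntNone := if model_id = "four_phase_linear" then
      ([] : List (Option Int)).foldl (fun c _ => c + 1) cntNone else cntNone
  let cntNone := if model_id = "gompertz" then
      [tmax, tdeath, mudeath].foldl (fun c _ => c + 1) cntNone else cntNone
  let cntNone := if model_id = "logistic" then
      [tmax, tdeath, mudeath].foldl (fun c _ => c + 1) cntNone else cntNone
  let cntNone := if model_id = "richards" then
      [tmax, tdeath, mudeath].foldl (fun c _ => c + 1) cntNone else cntNone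
  let cntNone := if model_id = "baranyi" then
      [tmax, tdeath, mudeath].foldl (fun c _ => c + 1) cntNone else cntNone
  let cntNone := if model_id = "baranyi_nolag" then
      [tlag, tmax, tdeath, mudeath].foldl (fun c _ => c + 1) cntNone else cntNone
  let cntNone := if model_id = "baranyi_nostat" then
      [ymax, tmax, tdeath, mudeath].foldl (fun c _ => c + 1) cntNone else cntNone
  let cntNone := if model_id = "baranyi_wlind" then
      [tmax].foldl (fun c _ => c + 1) cntNone else cntNone
  let cntNone := if model_id = "baranyi_wexpd" then
      [tmax].foldl (fun c _ => c + 1) cntNone else cntNone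
  let cntNone := if model_id = "garcia" then
      [tmax, tdeath, mudeath].foldl (fun c _ => c + 1) cntNone else cntNone
  cntNone

-- ===== PORT B =====
def unusedCounts : PySem.Dict String Int :=
  PySem.Dict.mk
    [("three_phase_linear", 2), ("four_phase_linear", 0), ("gompertz", 3),
     ("logistic", 3), ("richards", 3), ("baranyi", 3), ("baranyi_nolag", 4),
     ("baranyi_nostat", 4), ("baranyi_wlind", 1), ("baranyi_wexpd", 1), ("garcia", 3)]

def get_unused_params_alt (model_id : String) : Int :=
  PySem.Dict.getD unusedCounts model_id 0

-- ===== PRECONDITION & SPEC =====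
def Spec_get_unused_params (model_id : String) (out : Int) : Prop := out = get_unused_params_alt model_id
instance (model_id : String) (out : Int) : Decidable (Spec_get_unused_params model_id out) := by unfold Spec_get_unused_params; infer_instance

-- ===== CLAIM (what is proved, stated in full; the proofs are below) =====
def Claim_equal_get_unused_params : Prop := ∀ (model_id : String), Dom_get_unused_params model_id → Spec_get_unused_params model_id (get_unused_params model_id)

-- ===== LEMMAS AND PROOFS =====

-- ===== VERDICT (by name: the statement is the Claim_ definition above) =====
theorem get_unused_params_spec : Claim_equal_get_unused_params := by
  intro s _
  unfold Spec_get_unused_params get_unused_params get_unused_params_alt unusedCounts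
  by_cases h1 : s = "three_phase_linear"
  · subst h1; rfl
  by_cases h2 : s = "four_phase_linear"
  · subst h2; rfl
  by_cases h3 : s = "gompertz"
  · subst h3; rfl
  by_cases h4 : s = "logistic"
  · subst h4; rfl
  by_cases h5 : s = "richards"
  · subst h5; rfl
  by_cases h6 : s = "baranyi"
  · subst h6; rfl
  by_cases h7 : s = "baranyi_nolag"
  · subst h7; rfl
  by_cases h8 : s = "baranyi_nostat"
  · subst h8; rfl
  by_cases h9 : s = "baranyi_wlind"
  · subst h9; rfl
  by_cases h10 : s = "baranyi_wexpd"
  · subst h10; rfl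
  by_cases h11 : s = "garcia"
  · subst h11; rfl
  simp only [if_neg h1, if_neg h2, if_neg h3, if_neg h4, if_neg h5, if_neg h6, if_neg h7, if_neg h8, if_neg h9, if_neg h10, if_neg h11, PySem.Dict.getD, PySem.Dict.get?_mk_cons]
  simp [PySem.Dict.get?, Ne.symm h1, Ne.symm h2, Ne.symm h3, Ne.symm h4, Ne.symm h5, Ne.symm h6, Ne.symm h7, Ne.symm h8, Ne.symm h9, Ne.symm h10, Ne.symm h11]
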